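-- pv_equiv track=rewrite | github.com/SafiaK/Obligation-prohibition | JavaScriptAnnotationTool/style_Conversion.py | remove_undesired_text
-- ===== SOURCE A (Python) =====
-- def remove_undesired_text(text):
--     DOCTYPE = "\"http://www.w3.org/MarkUp/DTD/xhtml-rdfa-1.dtd\">"
--     if DOCTYPE in text:
--         text = text[text.index(DOCTYPE) + len(DOCTYPE):]
--
--     while "/styles/" in text:
--         text = text[:text.index("/styles/")] + \
--             "styles/" + \
--             text[text.index("/styles/") + len("/styles/"):]
--
--     return text
-- ===== SOURCE B (Python) =====
-- def remove_undesired_text(text):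
--     DOCTYPE = "\"http://www.w3.org/MarkUp/DTD/xhtml-rdfa-1.dtd\">"
--     if DOCTYPE in text:
--         text = text[text.index(DOCTYPE) + len(DOCTYPE):]
--
--     SLASH_STYLES = list("/styles/")
--     buf = []
--     for ch in text:
--         buf.append(ch)
--         while buf[-8:] == SLASH_STYLES:
--             del buf[-8]
--     return ''.join(buf)
-- ===== Notes on version B (the rewrite author's own statement) =====
-- stated objective: faster
-- what changed: A's while-loop rescans the text from the beginning after every single rewrite of the slash-plus-styles pattern; B makes one left-to-right pass keeping the output as a stack and, whenever the pattern has just completed at the top, deletes the slash element that precedes it (rechecking so cascades collapse), which reproduces A's leftmost rewriting in a single pass.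
import Mathlib
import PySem

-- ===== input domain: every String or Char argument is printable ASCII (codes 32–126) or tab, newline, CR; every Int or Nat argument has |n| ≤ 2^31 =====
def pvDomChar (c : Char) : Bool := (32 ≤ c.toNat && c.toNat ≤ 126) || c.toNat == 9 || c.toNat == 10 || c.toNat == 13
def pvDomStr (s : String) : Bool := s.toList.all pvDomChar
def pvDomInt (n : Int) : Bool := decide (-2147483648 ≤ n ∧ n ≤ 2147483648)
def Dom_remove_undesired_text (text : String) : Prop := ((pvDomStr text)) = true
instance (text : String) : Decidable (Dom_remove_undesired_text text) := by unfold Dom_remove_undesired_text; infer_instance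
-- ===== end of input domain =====

-- B replaces A's rescanning while-loop by one left-to-right stack pass
-- (append each char, then pop the '/' preceding a completed "/styles/"); objective: faster.

-- shared constants of the two Pythons
def pvDoctype : List Char := "\"http://www.w3.org/MarkUp/DTD/xhtml-rdfa-1.dtd\">".toList
def pvPat : List Char := "/styles/".toList
def pvStyles : List Char := "styles/".toList

theorem pvPat_len : pvPat.length = 8 := by decide
theorem pvStyles_len : pvStyles.length = 7 := by decide

-- the DOCTYPE-strip prefix code, byte-identical in A and in B (both Pythons start with
-- the same two lines); text[i + len:] with i = text.index(DOCTYPE) ≥ 0 is List.drop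
def pvStrip (t : List Char) : List Char :=
  if PySem.Chars.isIn pvDoctype t = true then
    t.drop ((PySem.Chars.find t pvDoctype).toNat + pvDoctype.length)
  else t

-- ===== PORT A =====
-- used by pvLoopA's termination proof (cited in decreasing_by)
theorem pvFind_occ (s : List Char) (h : PySem.Chars.isIn pvPat s = true) :
    pvPat <+: s.drop (PySem.Chars.find s pvPat).toNat := by
  have h0 : 0 ≤ PySem.Chars.find s pvPat :=
    (PySem.Chars.find_nonneg_iff _ _).mpr ((PySem.Chars.isIn_iff_infix _ _).mp h)
  exact (PySem.Chars.find_spec h0).1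

-- A's while loop: text = text[:i] + "styles/" + text[i+8:] with i = text.index("/styles/")
def pvLoopA (s : List Char) : List Char :=
  if h : PySem.Chars.isIn pvPat s = true then
    pvLoopA (s.take (PySem.Chars.find s pvPat).toNat ++ pvStyles
              ++ s.drop ((PySem.Chars.find s pvPat).toNat + 8))
  else s
termination_by s.length
decreasing_by
  have hl := (pvFind_occ s h).length_le
  rw [List.length_drop, pvPat_len] at hl
  simp only [List.length_append, List.length_take, List.length_drop, pvStyles_len]
  omega

def remove_undesired_text (text : String) : String :=
  String.mk (pvLoopA (pvStrip text.toList))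

-- ===== PORT B =====
-- B's inner while: while buf[-8:] == list("/styles/"): del buf[-8]
def pvCollapse (a : List Char) : List Char :=
  if h : a.drop (a.length - 8) = pvPat then
    pvCollapse (a.eraseIdx (a.length - 8))
  else a
termination_by a.length
decreasing_by
  have hl := congrArg List.length h
  rw [List.length_drop, pvPat_len] at hl
  rw [List.length_eraseIdx, if_pos (by omega)]
  omega

-- B's for-loop over the characters, buf as accumulator
def remove_undesired_text_alt (text : String) : String :=
  String.mk ((pvStrip text.toList).foldl (fun buf c => pvCollapse (buf ++ [c])) [])

-- ===== PRECONDITION & SPEC =====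
def Spec_remove_undesired_text (text : String) (out : String) : Prop := out = remove_undesired_text_alt text
instance (text : String) (out : String) : Decidable (Spec_remove_undesired_text text out) := by unfold Spec_remove_undesired_text; infer_instance

-- ===== CLAIM (what is proved, stated in full; the proofs are below) =====
def Claim_equal_remove_undesired_text : Prop := ∀ (text : String), Dom_remove_undesired_text text → Spec_remove_undesired_text text (remove_undesired_text text)

-- ===== LEMMAS AND PROOFS =====

-- occurrence of "/styles/" starting at position i
def pvOcc (s : List Char) (i : Nat) : Prop := pvPat <+: s.drop i

-- no occurrence anywhere
def pvNoOcc (s : List Char) : Prop := ∀ i, ¬ pvOcc s i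

-- every occurrence ends exactly at the end of the string
def pvQ (s : List Char) : Prop := ∀ i, pvOcc s i → i + 8 = s.length

theorem pvOcc_length {s : List Char} {i : Nat} (h : pvOcc s i) : i + 8 ≤ s.length := by
  have hl := h.length_le
  rw [List.length_drop, pvPat_len] at hl
  omega

-- a prefix of an append that fits inside the left part
theorem pvPrefix_left {x y : List Char} (h : pvPat <+: x ++ y) (hl : 8 ≤ x.length) :
    pvPat <+: x := by
  have e := List.prefix_iff_eq_take.mp h
  rw [pvPat_len, List.take_append_of_le_length hl] at e
  rw [e]
  exact List.take_prefix _ _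

theorem pvNoOcc_isIn {s : List Char} (h : pvNoOcc s) :
    PySem.Chars.isIn pvPat s = false := by
  cases hb : PySem.Chars.isIn pvPat s
  · rfl
  · obtain ⟨j, hj⟩ := (PySem.Chars.exists_prefix_drop_iff_isIn _ _).mpr hb
    exact absurd hj (h j)

theorem pvLoopA_fix {s : List Char} (h : pvNoOcc s) : pvLoopA s = s := by
  unfold pvLoopA
  simp [pvNoOcc_isIn h]

-- appending one char to an occurrence-free buffer: any occurrence ends at the new last char
theorem pvQ_snoc {acc : List Char} (c : Char) (h : pvNoOcc acc) : pvQ (acc ++ [c]) := by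
  intro i hi
  have hlen := pvOcc_length hi
  simp only [List.length_append, List.length_cons, List.length_nil] at hlen ⊢
  by_cases hc : i + 8 ≤ acc.length
  · exfalso
    rw [pvOcc, List.drop_append_of_le_length (by omega)] at hi
    exact h i (pvPrefix_left hi (by rw [List.length_drop]; omega))
  · omega

-- the end-test of pvCollapse forces length ≥ 8
theorem pvEnd_len {a : List Char} (h : a.drop (a.length - 8) = pvPat) : 8 ≤ a.length := by
  have hl := congrArg List.length h
  rw [List.length_drop, pvPat_len] at hl
  omega

theorem pvEraseIdx_append (l₁ l₂ : List Char) :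
    (l₁ ++ l₂).eraseIdx l₁.length = l₁ ++ l₂.tail := by
  induction l₁ with
  | nil => cases l₂ <;> rfl
  | cons a l ih => rw [List.cons_append, List.length_cons, List.eraseIdx_cons_succ, ih, List.cons_append]

-- deleting buf[-8] of an end-occurrence replaces the final "/styles/" by "styles/"
theorem pvErase_eq {a : List Char} (h : a.drop (a.length - 8) = pvPat) :
    a.eraseIdx (a.length - 8) = a.take (a.length - 8) ++ pvStyles := by
  have h8 := pvEnd_len h
  have htl : (a.take (a.length - 8)).length = a.length - 8 := by
    rw [List.length_take]; omega
  conv_lhs => rw [← List.take_append_drop (a.length - 8) a, h]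
  have hlen : (a.take (a.length - 8) ++ pvPat).length - 8 = (a.take (a.length - 8)).length := by
    rw [List.length_append, pvPat_len]; omega
  rw [hlen, pvEraseIdx_append]
  rfl

-- with an end-occurrence and pvQ, the first occurrence in a ++ r is at a.length - 8
theorem pvFind_end {a : List Char} (r : List Char) (hQ : pvQ a)
    (h : a.drop (a.length - 8) = pvPat) :
    PySem.Chars.isIn pvPat (a ++ r) = true ∧
      (PySem.Chars.find (a ++ r) pvPat).toNat = a.length - 8 := by
  have h8 := pvEnd_len h
  have hocc : pvOcc (a ++ r) (a.length - 8) := by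
    rw [pvOcc, List.drop_append_of_le_length (by omega), h]
    exact List.prefix_append _ _
  have hIn : PySem.Chars.isIn pvPat (a ++ r) = true :=
    (PySem.Chars.exists_prefix_drop_iff_isIn _ _).mp ⟨_, hocc⟩
  have h0 : 0 ≤ PySem.Chars.find (a ++ r) pvPat :=
    (PySem.Chars.find_nonneg_iff _ _).mpr ((PySem.Chars.isIn_iff_infix _ _).mp hIn)
  obtain ⟨hf, hmin⟩ := PySem.Chars.find_spec h0
  refine ⟨hIn, ?_⟩
  set f := (PySem.Chars.find (a ++ r) pvPat).toNat with hfd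
  have hle : ¬ (a.length - 8 < f) := fun hlt => hmin _ hlt hocc
  by_contra hne
  have hflt : f < a.length - 8 := by omega
  rw [List.drop_append_of_le_length (by omega)] at hf
  have hfa : pvPat <+: a.drop f :=
    pvPrefix_left hf (by rw [List.length_drop]; omega)
  have := hQ f hfa
  omega

-- removing the '/' of an end-occurrence keeps pvQ
theorem pvQ_erase {a : List Char} (hQ : pvQ a) (h : a.drop (a.length - 8) = pvPat) :
    pvQ (a.eraseIdx (a.length - 8)) := by
  have h8 := pvEnd_len h
  have ht : a = a.take (a.length - 8) ++ pvPat := by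
    conv_lhs => rw [← List.take_append_drop (a.length - 8) a, h]
  rw [pvErase_eq h]
  set t := a.take (a.length - 8) with htd
  have htl : t.length = a.length - 8 := by rw [htd, List.length_take]; omega
  intro i hi
  have hlen := pvOcc_length hi
  simp only [List.length_append, pvStyles_len] at hlen ⊢
  by_cases hc : i + 2 ≤ t.length
  · exfalso
    rw [pvOcc, List.drop_append_of_le_length (by omega)] at hi
    by_cases h8' : 8 ≤ t.length - i
    · -- occurrence entirely inside t: an occurrence of a not at its end
      have hfa : pvPat <+: t.drop i := pvPrefix_left hi (by rw [List.length_drop]; omega)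
      have hoa : pvOcc a i := by
        rw [pvOcc, ht, List.drop_append_of_le_length (by omega)]
        exact hfa.trans (List.prefix_append _ _)
      have := hQ i hoa
      omega
    · -- occurrence straddles into "styles/": its final '/' would have to be a "styles" char
      have hx : (t.drop i).length = t.length - i := List.length_drop ..
      have e0 := List.prefix_iff_eq_take.mp hi
      rw [pvPat_len] at e0
      have e : pvPat.drop (t.length - i) = pvStyles.take (8 - (t.length - i)) := by
        conv_lhs => rw [e0]
        rw [List.drop_take, List.drop_append_of_le_length (by omega),
          List.drop_of_length_le (by omega), List.nil_append]
      have hd2 : 2 ≤ t.length - i := by omega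
      have hd7 : t.length - i ≤ 7 := by omega
      generalize hg : t.length - i = d at e hd2 hd7
      interval_cases d <;> revert e <;> decide
  · omega

-- one A-rewrite equals the one deletion pvCollapse makes
theorem pvStepA {a : List Char} (r : List Char) (hQ : pvQ a)
    (h : a.drop (a.length - 8) = pvPat) :
    pvLoopA (a ++ r) = pvLoopA (a.eraseIdx (a.length - 8) ++ r) := by
  have h8 := pvEnd_len h
  obtain ⟨hIn, hf⟩ := pvFind_end r hQ h
  conv_lhs => rw [pvLoopA]
  rw [dif_pos hIn, hf, List.take_append_of_le_length (by omega),
    (by omega : a.length - 8 + 8 = a.length), List.drop_left, pvErase_eq h,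
    List.append_assoc]

-- the inner-while postcondition: collapse yields an occurrence-free buffer and
-- commutes with A's rewriting on any suffix
theorem pvCollapse_spec (a : List Char) (hQ : pvQ a) :
    pvNoOcc (pvCollapse a) ∧ ∀ r, pvLoopA (a ++ r) = pvLoopA (pvCollapse a ++ r) := by
  by_cases h : a.drop (a.length - 8) = pvPat
  · have hc : pvCollapse a = pvCollapse (a.eraseIdx (a.length - 8)) := by
      conv_lhs => rw [pvCollapse]
      rw [dif_pos h]
    obtain ⟨h1, h2⟩ := pvCollapse_spec (a.eraseIdx (a.length - 8)) (pvQ_erase hQ h)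
    exact ⟨hc ▸ h1, fun r => (pvStepA r hQ h).trans ((h2 r).trans (by rw [hc]))⟩
  · have hc : pvCollapse a = a := by
      conv_lhs => rw [pvCollapse]
      rw [dif_neg h]
    refine ⟨?_, fun r => by rw [hc]⟩
    rw [hc]
    intro i hocc
    have hlen := pvOcc_length hocc
    have hi : i = a.length - 8 := hQ i hocc ▸ by omega
    rw [pvOcc, hi] at hocc
    exact h (hocc.eq_of_length (by rw [List.length_drop, pvPat_len]; omega)).symm
termination_by a.length
decreasing_by
  have hl := congrArg List.length h
  rw [List.length_drop, pvPat_len] at hl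
  rw [List.length_eraseIdx, if_pos (by omega)]
  omega

-- main loop invariant: A's rescanning loop = B's single pass
theorem pvLoop_eq (rest : List Char) : ∀ acc, pvNoOcc acc →
    pvLoopA (acc ++ rest) = rest.foldl (fun buf c => pvCollapse (buf ++ [c])) acc := by
  induction rest with
  | nil => intro acc h; simpa using pvLoopA_fix h
  | cons c rest ih =>
    intro acc h
    obtain ⟨hN, hA⟩ := pvCollapse_spec (acc ++ [c]) (pvQ_snoc c h)
    calc pvLoopA (acc ++ c :: rest) = pvLoopA ((acc ++ [c]) ++ rest) := by simp
      _ = pvLoopA (pvCollapse (acc ++ [c]) ++ rest) := hA rest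
      _ = _ := ih _ hN

theorem pvNoOcc_nil : pvNoOcc [] := by
  intro i h
  have := h.length_le
  simp [pvPat_len] at this

-- ===== VERDICT (by name: the statement is the Claim_ definition above) =====
theorem remove_undesired_text_spec : Claim_equal_remove_undesired_text := by
  intro text _
  unfold Spec_remove_undesired_text remove_undesired_text remove_undesired_text_alt
  exact congrArg String.mk (pvLoop_eq (pvStrip text.toList) [] pvNoOcc_nil)
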